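-- pv_equiv track=rewrite | github.com/LocusLontrime/Python | Yandex_int/Diff_one_2.py | i_am_accurate_brut
-- ===== SOURCE A (Python) =====
-- def i_am_accurate_brut(arr: list[int]):
--     counter = 0
--     for j in range(len(arr)):
--         sum_ = arr[j]
--         for i in range(j + 1, len(arr)):
--             sum_ += arr[i]
--             if arr[j] <= sum_ <= arr[i]:
--                 counter += 1
--     return counter
-- ===== SOURCE B (Python) =====
-- def i_am_accurate_brut(arr: list[int]):
--     # Prefix sums: arr[j] <= sum(arr[j..i]) <= arr[i]  <=>  p[j+1] <= p[i+1] and p[i] <= p[j]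
--     p = [0]
--     s = 0
--     for x in arr:
--         s += x
--         p.append(s)
--     n = len(arr)
--     return sum(1 for i in range(n) for j in range(i)
--                if p[j + 1] <= p[i + 1] and p[i] <= p[j])
-- ===== Notes on version B (the rewrite author's own statement) =====
-- stated objective: alternative
-- what changed: B precomputes the prefix-sum array once and counts pairs (j,i) with the equivalent dominance condition p[j+1] <= p[i+1] and p[i] <= p[j], instead of A's nested loops that re-accumulate a running subarray sum for every start index.
import Mathlib
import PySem

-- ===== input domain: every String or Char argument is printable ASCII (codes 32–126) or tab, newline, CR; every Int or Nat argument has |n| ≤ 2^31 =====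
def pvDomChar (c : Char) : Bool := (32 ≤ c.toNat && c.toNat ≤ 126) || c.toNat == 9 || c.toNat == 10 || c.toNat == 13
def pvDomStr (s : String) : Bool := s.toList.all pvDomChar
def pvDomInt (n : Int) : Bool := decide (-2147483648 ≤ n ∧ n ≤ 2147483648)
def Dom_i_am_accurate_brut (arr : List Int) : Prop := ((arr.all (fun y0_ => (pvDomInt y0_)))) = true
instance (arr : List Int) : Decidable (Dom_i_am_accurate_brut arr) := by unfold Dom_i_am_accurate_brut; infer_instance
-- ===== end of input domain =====

-- B replaces A's running inner sum by precomputed prefix sums and counts the pairs (j,i)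
-- via the equivalent dominance condition p[j+1] ≤ p[i+1] ∧ p[i] ≤ p[j]; objective: alternative.

-- ===== PORT A =====
def i_am_accurate_brut (arr : List Int) : Int :=
  (PySem.List.pyRange 0 (arr.length : Int)).foldl (fun counter j =>
    ((PySem.List.pyRange (j + 1) (arr.length : Int)).foldl
      (fun (st : Int × Int) i =>
        let sum_ := st.1 + PySem.List.pyGetD arr i 0
        (sum_, if PySem.List.pyGetD arr j 0 ≤ sum_ ∧ sum_ ≤ PySem.List.pyGetD arr i 0
               then st.2 + 1 else st.2))
      (PySem.List.pyGetD arr j 0, counter)).2) 0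

-- ===== PORT B =====
def i_am_accurate_brut_alt (arr : List Int) : Int :=
  let p := (arr.foldl (fun (st : List Int × Int) x =>
      let s := st.2 + x
      (st.1 ++ [s], s)) ([0], 0)).1
  let n := (arr.length : Int)
  ((PySem.List.pyRange 0 n).flatMap (fun i =>
    (PySem.List.pyRange 0 i).filterMap (fun j =>
      if PySem.List.pyGetD p (j + 1) 0 ≤ PySem.List.pyGetD p (i + 1) 0 ∧
         PySem.List.pyGetD p i 0 ≤ PySem.List.pyGetD p j 0
      then some (1 : Int) else none))).sum

-- ===== PRECONDITION & SPEC =====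
def Spec_i_am_accurate_brut (arr : List Int) (out : Int) : Prop := out = i_am_accurate_brut_alt arr
instance (arr : List Int) (out : Int) : Decidable (Spec_i_am_accurate_brut arr out) := by unfold Spec_i_am_accurate_brut; infer_instance

-- ===== CLAIM (what is proved, stated in full; the proofs are below) =====
def Claim_equal_i_am_accurate_brut : Prop := ∀ (arr : List Int), Dom_i_am_accurate_brut arr → Spec_i_am_accurate_brut arr (i_am_accurate_brut arr)

-- ===== LEMMAS AND PROOFS =====

-- prefix sum of the first k elements
def pvS (arr : List Int) (k : Nat) : Int := (arr.take k).sum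

-- the indicator counted for the pair (j, i)
def pvInd (arr : List Int) (j i : Nat) : Int :=
  if arr.getD j 0 ≤ pvS arr (i + 1) - pvS arr j ∧ pvS arr (i + 1) - pvS arr j ≤ arr.getD i 0
  then 1 else 0

theorem pvS_succ (arr : List Int) (k : Nat) : pvS arr (k + 1) = pvS arr k + arr.getD k 0 := by
  simp [pvS, List.take_succ, List.getD]
  cases h : arr[k]? <;> simp

theorem pvS_cons (x : Int) (t : List Int) (k : Nat) : pvS (x :: t) (k + 1) = x + pvS t k := by
  simp [pvS]

theorem pyRange_natCast (a n : Nat) :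
    PySem.List.pyRange (a : Int) (n : Int) = (List.range' a (n - a)).map (fun k : Nat => (k : Int)) := by
  rw [PySem.List.pyRange_of_pos _ _ (by norm_num : (0:Int) < 1), List.range'_eq_map_range,
      List.map_map]
  by_cases h : a < n
  · have h1 : ((a:Int) < (n:Int)) := by exact_mod_cast h
    rw [if_pos h1]
    have h2 : ((n:Int) - a + 1 - 1) / 1 = ((n - a : Nat) : Int) := by omega
    rw [h2, Int.toNat_natCast]
    apply List.map_congr_left
    intro x hx
    simp [Function.comp]
  · have h1 : ¬((a:Int) < (n:Int)) := by exact_mod_cast h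
    rw [if_neg h1]
    have : n - a = 0 := by omega
    simp [this]

-- A's inner loop: the running sum_ is pvS arr (i+1) - pvS arr j, and the second
-- component accumulates one pvInd per visited index
theorem inner_loop (arr : List Int) (j : Nat) : ∀ (len a : Nat) (c s : Int),
    s = pvS arr a - pvS arr j →
    (((List.range' a len).map (fun k : Nat => (k : Int))).foldl
      (fun (st : Int × Int) i =>
        let sum_ := st.1 + PySem.List.pyGetD arr i 0
        (sum_, if PySem.List.pyGetD arr (j : Int) 0 ≤ sum_ ∧ sum_ ≤ PySem.List.pyGetD arr i 0
               then st.2 + 1 else st.2))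
      (s, c)).2
    = c + ((List.range' a len).map (fun i => pvInd arr j i)).sum := by
  intro len
  induction len with
  | zero => intro a c s hs; simp
  | succ m ih =>
    intro a c s hs
    rw [List.range'_succ]
    simp only [List.map_cons, List.foldl_cons, List.sum_cons]
    rw [ih (a + 1) _ _ (by rw [hs, pvS_succ]; simp [PySem.List.pyGetD_natCast]; ring)]
    simp only [PySem.List.pyGetD_natCast]
    rw [pvInd]
    have harr : s + arr.getD a 0 = pvS arr (a + 1) - pvS arr j := by rw [pvS_succ]; omega
    rw [harr]
    split_ifs <;> ring

-- unconditional corollary of inner_loop in the exact shape of A's code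
theorem inner_loop' (arr : List Int) (j len : Nat) (c : Int) :
    (((List.range' (j + 1) len).map (fun k : Nat => (k : Int))).foldl
      (fun (st : Int × Int) i =>
        let sum_ := st.1 + PySem.List.pyGetD arr i 0
        (sum_, if PySem.List.pyGetD arr (j : Int) 0 ≤ sum_ ∧ sum_ ≤ PySem.List.pyGetD arr i 0
               then st.2 + 1 else st.2))
      (PySem.List.pyGetD arr (j : Int) 0, c)).2
    = c + ((List.range' (j + 1) len).map (fun i => pvInd arr j i)).sum :=
  inner_loop arr j len (j + 1) c _ (by rw [PySem.List.pyGetD_natCast, pvS_succ]; ring)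

-- B's prefix-sum list builder
theorem prefix_list (arr : List Int) : ∀ (p0 : List Int) (s0 : Int),
    arr.foldl (fun (st : List Int × Int) x => let s := st.2 + x; (st.1 ++ [s], s)) (p0, s0)
    = (p0 ++ (List.range arr.length).map (fun k => s0 + pvS arr (k + 1)), s0 + arr.sum) := by
  induction arr with
  | nil => intro p0 s0; simp
  | cons x t ih =>
    intro p0 s0
    simp only [List.foldl_cons]
    rw [ih]
    simp only [List.length_cons, List.range_succ_eq_map, List.map_cons, List.map_map]
    refine Prod.ext ?_ ?_
    · show p0 ++ [s0 + x] ++ _ = p0 ++ _ :: _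
      rw [List.append_assoc]
      congr 1
      show (s0 + x) :: _ = _
      congr 1
      · rw [pvS_cons]; simp [pvS]
      · apply List.map_congr_left; intro k hk
        show s0 + x + pvS t (k + 1) = s0 + pvS (x :: t) (k + 1 + 1)
        rw [pvS_cons]
        ring
    · show s0 + x + t.sum = s0 + (x :: t).sum
      simp; ring

theorem prefix_getD (arr : List Int) (k : Nat) (hk : k ≤ arr.length) :
    (([0] ++ (List.range arr.length).map (fun k => 0 + pvS arr (k + 1))) : List Int).getD k 0
      = pvS arr k := by
  cases k with
  | zero => simp [pvS]
  | succ m =>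
    have hm : m < arr.length := by omega
    simp [List.getD, hm]

theorem list_sum_range (n : Nat) (f : Nat → Int) :
    ((List.range n).map f).sum = ∑ i ∈ Finset.range n, f i := by
  induction n with
  | zero => simp
  | succ m ih => simp [List.range_succ, Finset.sum_range_succ, ih]

theorem list_sum_range' (a len : Nat) (f : Nat → Int) :
    ((List.range' a len).map f).sum = ∑ i ∈ Finset.Ico a (a + len), f i := by
  rw [List.range'_eq_map_range, Finset.sum_Ico_eq_sum_range]
  simp [List.map_map, list_sum_range, Function.comp]

theorem filterMap_sum (xs : List Nat) (c : Nat → Prop) [DecidablePred c] :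
    (xs.filterMap (fun j => if c j then some (1 : Int) else none)).sum
      = (xs.map (fun j => if c j then (1 : Int) else 0)).sum := by
  induction xs with
  | nil => rfl
  | cons x t ih => by_cases h : c x <;> simp [h, ih]

theorem cond_iff (arr : List Int) (j i : Nat) :
    (if pvS arr (j + 1) ≤ pvS arr (i + 1) ∧ pvS arr i ≤ pvS arr j then (1 : Int) else 0)
      = pvInd arr j i := by
  unfold pvInd
  have hj := pvS_succ arr j
  have hi := pvS_succ arr i
  apply if_congr _ rfl rfl
  constructor <;> intro h <;> omega

theorem A_eq (arr : List Int) :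
    i_am_accurate_brut arr
      = ∑ j ∈ Finset.range arr.length, ∑ i ∈ Finset.Ico (j + 1) arr.length, pvInd arr j i := by
  unfold i_am_accurate_brut
  rw [PySem.List.pyRange_zero_natCast, List.foldl_map]
  simp only [show ∀ j : Nat, (j : Int) + 1 = ((j + 1 : Nat) : Int) by intro j; push_cast; ring,
    pyRange_natCast, inner_loop']
  rw [PySem.List.foldl_add, list_sum_range]
  rw [zero_add]
  apply Finset.sum_congr rfl
  intro j hj
  have hj' : j < arr.length := Finset.mem_range.mp hj
  rw [list_sum_range', Nat.add_sub_cancel' (by omega : j + 1 ≤ arr.length)]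

theorem B_eq (arr : List Int) :
    i_am_accurate_brut_alt arr
      = ∑ i ∈ Finset.range arr.length, ∑ j ∈ Finset.range i, pvInd arr j i := by
  unfold i_am_accurate_brut_alt
  rw [prefix_list arr [0] 0]
  dsimp only
  rw [PySem.List.pyRange_zero_natCast, List.flatMap_map, List.flatMap_def, List.sum_flatten,
    List.map_map]
  simp only [Function.comp, PySem.List.pyRange_zero_natCast, List.filterMap_map]
  rw [list_sum_range]
  apply Finset.sum_congr rfl
  intro i hi
  have hin : i < arr.length := Finset.mem_range.mp hi
  rw [Function.comp_apply, filterMap_sum, list_sum_range]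
  apply Finset.sum_congr rfl
  intro j hj
  have hji : j < i := Finset.mem_range.mp hj
  have e1 : ((j : Int) + 1) = ((j + 1 : Nat) : Int) := by push_cast; ring
  have e2 : ((i : Int) + 1) = ((i + 1 : Nat) : Int) := by push_cast; ring
  rw [e1, e2]
  simp only [PySem.List.pyGetD_natCast]
  rw [prefix_getD arr (j + 1) (by omega), prefix_getD arr (i + 1) (by omega),
    prefix_getD arr i (by omega), prefix_getD arr j (by omega)]
  exact cond_iff arr j i

-- ===== VERDICT (by name: the statement is the Claim_ definition above) =====
theorem i_am_accurate_brut_spec : Claim_equal_i_am_accurate_brut := by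
  intro arr _
  unfold Spec_i_am_accurate_brut
  rw [A_eq, B_eq]
  exact Finset.sum_comm' (fun j i => by
    simp only [Finset.mem_range, Finset.mem_Ico]
    omega)
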